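-- pv_equiv track=rewrite | github.com/ddu0422/study | algorithm/baekjoon/greedy/silver3/1449.py | solution
-- ===== SOURCE A (Python) =====
-- def solution(l, pipes):
--     if l == 1:
--         return len(pipes)
--
--     answer = 0
--     total = 0
--     pipes.sort()
--
--     for i in range(len(pipes) - 1):
--         distance = pipes[i + 1] - pipes[i]
--         if total + distance <= l - 1:
--             total += distance
--         else:
--             total = 0
--             answer += 1
--
--     return answer + 1
-- ===== SOURCE B (Python) =====
-- def solution(l, pipes):
--     pipes.sort()
--     n = len(pipes)
--     count = 0
--     i = 0
--     while i < n:
--         count += 1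
--         end = pipes[i] + l - 1
--         # binary search for the first index j in (i, n) with pipes[j] > end
--         lo, hi = i + 1, n
--         while lo < hi:
--             mid = (lo + hi) // 2
--             if pipes[mid] <= end:
--                 lo = mid + 1
--             else:
--                 hi = mid
--         i = lo
--     return count
-- ===== Notes on version B (the rewrite author's own statement) =====
-- stated objective: alternative
-- what changed: Replaces A's single pass that accumulates consecutive gaps into a running total with an outer loop over tape starts that jumps to the first pipe past the current tape's end by a hand-written binary search over the sorted array, dropping the l==1 special case and the per-element gap arithmetic.
-- intended difference: On an empty pipe list with l != 1 A returns 1 tape while B returns the intended 0, and for l == 1 with duplicate positions A returns len(pipes) counting each duplicate while B returns the number of distinct positions, which is the intended count since one tape already covers a repeated position. — e.g. on solution(2, []): A returns 1, B returns 0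
import Mathlib
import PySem

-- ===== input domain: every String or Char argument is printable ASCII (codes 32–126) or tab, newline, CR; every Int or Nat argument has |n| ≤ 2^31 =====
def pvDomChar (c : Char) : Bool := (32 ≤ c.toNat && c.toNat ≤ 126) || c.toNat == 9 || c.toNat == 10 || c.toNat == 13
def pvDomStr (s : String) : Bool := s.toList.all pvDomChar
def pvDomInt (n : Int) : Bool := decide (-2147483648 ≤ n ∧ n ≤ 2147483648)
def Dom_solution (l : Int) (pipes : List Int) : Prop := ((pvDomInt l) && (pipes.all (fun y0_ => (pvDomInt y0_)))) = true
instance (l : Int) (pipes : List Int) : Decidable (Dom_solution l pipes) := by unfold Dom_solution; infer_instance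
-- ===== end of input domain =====

-- B replaces A's running-gap accumulator with an outer loop over tape starts that jumps to the next
-- uncovered pipe by binary search (no l==1 special case); both Pythons sort `pipes` in place, so only
-- the return value is compared here.

-- ===== PORT A =====
def solution (l : Int) (pipes : List Int) : Int :=
  if l = 1 then (pipes.length : Int)
  else
    let s := PySem.List.sorted pipes (fun x => x) false
    let st := (PySem.List.pyRange 0 ((s.length : Int) - 1) 1).foldl
      (fun (st : Int × Int) i =>
        let distance := PySem.List.pyGetD s (i + 1) 0 - PySem.List.pyGetD s i 0
        if st.2 + distance ≤ l - 1 then (st.1, st.2 + distance) else (st.1 + 1, 0))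
      (0, 0)
    st.1 + 1

-- ===== PORT B =====
-- inner `while lo < hi` binary-search loop of Source B (fuel = hi - lo makes the recursion structural)
def bsearch (s : List Int) (e : Int) : Nat → Nat → Nat → Nat
  | 0, lo, _hi => lo
  | fuel + 1, lo, hi =>
    if lo < hi then
      if PySem.List.pyGetD s (((lo + hi) / 2 : Nat) : Int) 0 ≤ e then
        bsearch s e fuel ((lo + hi) / 2 + 1) hi
      else bsearch s e fuel lo ((lo + hi) / 2)
    else lo

-- outer `while i < n` loop of Source B (fuel = n - i; i advances by at least one each iteration)
def goB (l : Int) (s : List Int) : Nat → Int → Nat → Int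
  | 0, count, _i => count
  | fuel + 1, count, i =>
    if i < s.length then
      goB l s fuel (count + 1)
        (bsearch s (PySem.List.pyGetD s (i : Int) 0 + l - 1) (s.length - (i + 1)) (i + 1) s.length)
    else count

def solution_alt (l : Int) (pipes : List Int) : Int :=
  let s := PySem.List.sorted pipes (fun x => x) false
  goB l s s.length 0 0

-- ===== PRECONDITION & SPEC =====
-- On an empty pipe list with l ≠ 1, A returns 1 tape where B returns the intended 0; with l = 1 and
-- duplicate pipe positions, A counts every duplicate (len(pipes)) where B returns the intended number
-- of distinct positions, since one unit tape already covers a repeated position.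
def D_solution (l : Int) (pipes : List Int) : Prop :=
  (l ≠ 1 ∧ pipes = []) ∨ (l = 1 ∧ ¬ pipes.Nodup)
instance (l : Int) (pipes : List Int) : Decidable (D_solution l pipes) := by
  unfold D_solution; infer_instance
def Spec_solution (l : Int) (pipes : List Int) (out : Int) : Prop :=
  ¬ D_solution l pipes → out = solution_alt l pipes
instance (l : Int) (pipes : List Int) (out : Int) : Decidable (Spec_solution l pipes out) := by
  unfold Spec_solution; infer_instance
def pvDiffWitness_solution : Int × List Int := (2, [])
def pvDiffWitnessOut_solution : Int × Int := (1, 0)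

-- ===== CLAIM (what is proved, stated in full; the proofs are below) =====
def Claim_unchanged_solution : Prop :=
  ∀ (l : Int) (pipes : List Int), Dom_solution l pipes → Spec_solution l pipes (solution l pipes)
def Claim_changed_solution : Prop :=
  Dom_solution (pvDiffWitness_solution.1) (pvDiffWitness_solution.2) ∧
  D_solution (pvDiffWitness_solution.1) (pvDiffWitness_solution.2) ∧
  solution (pvDiffWitness_solution.1) (pvDiffWitness_solution.2) = pvDiffWitnessOut_solution.1 ∧
  solution_alt (pvDiffWitness_solution.1) (pvDiffWitness_solution.2) = pvDiffWitnessOut_solution.2 ∧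
  pvDiffWitnessOut_solution.1 ≠ pvDiffWitnessOut_solution.2
def Claim_exact_solution : Prop :=
  ∀ (l : Int) (pipes : List Int), Dom_solution l pipes → D_solution l pipes →
    solution l pipes ≠ solution_alt l pipes

-- ===== LEMMAS AND PROOFS =====

-- A's loop body as a named function (definitionally the lambda in the port).
def astep (l : Int) (s : List Int) (st : Int × Int) (i : Int) : Int × Int :=
  let distance := PySem.List.pyGetD s (i + 1) 0 - PySem.List.pyGetD s i 0
  if st.2 + distance ≤ l - 1 then (st.1, st.2 + distance) else (st.1 + 1, 0)

-- The reference endpoint-greedy step both proofs are routed through: A's accumulator and B's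
-- binary-search jumps are each shown equal to a fold of this step over the sorted list.
def bstep (l : Int) (st : Int × Option Int) (p : Int) : Int × Option Int :=
  match st.2 with
  | none => (st.1 + 1, some (p + l - 1))
  | some e => if e < p then (st.1 + 1, some (p + l - 1)) else st

-- A's index loop, rewritten as structural recursion carrying the previous element.
def goA (l : Int) (st : Int × Int) (prev : Int) : List Int → Int × Int
  | [] => st
  | p :: rest =>
      goA l (if st.2 + (p - prev) ≤ l - 1 then (st.1, st.2 + (p - prev)) else (st.1 + 1, 0)) p rest

lemma solution_eq (l : Int) (pipes : List Int) (hl : l ≠ 1) :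
    solution l pipes =
      ((PySem.List.pyRange 0 (((PySem.List.sorted pipes (fun x => x) false).length : Int) - 1) 1).foldl
        (astep l (PySem.List.sorted pipes (fun x => x) false)) (0, 0)).1 + 1 := by
  unfold solution
  rw [if_neg hl]
  rfl

-- ---- bridge from B's port to the bstep fold ----

lemma bsearch_spec (s : List Int) (e : Int)
    (hmono : ∀ k m : Nat, k ≤ m → m < s.length → s.getD k 0 ≤ s.getD m 0) :
    ∀ (fuel lo hi : Nat), hi - lo ≤ fuel → lo ≤ hi → hi ≤ s.length →
      lo ≤ bsearch s e fuel lo hi ∧ bsearch s e fuel lo hi ≤ hi ∧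
      (∀ k, lo ≤ k → k < bsearch s e fuel lo hi → s.getD k 0 ≤ e) ∧
      (bsearch s e fuel lo hi < hi → e < s.getD (bsearch s e fuel lo hi) 0) := by
  intro fuel
  induction fuel with
  | zero =>
      intro lo hi hd hlohi hhi
      simp only [bsearch]
      exact ⟨le_refl _, hlohi, fun k hk1 hk2 => absurd (lt_of_le_of_lt hk1 hk2) (lt_irrefl _),
        fun h => absurd h (by omega)⟩
  | succ d ih =>
      intro lo hi hd hlohi hhi
      simp only [bsearch]
      by_cases h : lo < hi
      · rw [if_pos h]
        have hmid1 : lo ≤ (lo + hi) / 2 := by omega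
        have hmid2 : (lo + hi) / 2 < hi := by omega
        by_cases hc : PySem.List.pyGetD s (((lo + hi) / 2 : Nat) : Int) 0 ≤ e
        · rw [if_pos hc]
          rw [PySem.List.pyGetD_natCast] at hc
          obtain ⟨h1, h2, h3, h4⟩ := ih ((lo + hi) / 2 + 1) hi (by omega) (by omega) hhi
          refine ⟨by omega, h2, ?_, h4⟩
          intro k hk1 hk2
          by_cases hkm : k ≤ (lo + hi) / 2
          · exact le_trans (hmono k ((lo + hi) / 2) hkm (by omega)) hc
          · exact h3 k (by omega) hk2
        · rw [if_neg hc]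
          rw [PySem.List.pyGetD_natCast] at hc
          push_neg at hc
          obtain ⟨h1, h2, h3, h4⟩ := ih lo ((lo + hi) / 2) (by omega) hmid1 (by omega)
          refine ⟨h1, by omega, h3, ?_⟩
          intro hr
          by_cases hrm : bsearch s e d lo ((lo + hi) / 2) < (lo + hi) / 2
          · exact h4 hrm
          · have : bsearch s e d lo ((lo + hi) / 2) = (lo + hi) / 2 := by omega
            rw [this]; exact hc
      · rw [if_neg h]
        exact ⟨le_refl _, hlohi, fun k hk1 hk2 => absurd (lt_of_le_of_lt hk1 hk2) (lt_irrefl _),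
          fun hlt => absurd hlt h⟩

-- elements already under the current endpoint are skipped by the bstep fold
lemma fold_skip (l : Int) (s : List Int) (e : Int) :
    ∀ (m k j : Nat) (c : Int), k ≤ j → j ≤ s.length → j - k ≤ m →
      (∀ k', k ≤ k' → k' < j → s.getD k' 0 ≤ e) →
      ((s.drop k).foldl (bstep l) (c, some e)).1 = ((s.drop j).foldl (bstep l) (c, some e)).1 := by
  intro m
  induction m with
  | zero =>
      intro k j c hkj hj hd _
      have : k = j := by omega
      rw [this]
  | succ m ih =>
      intro k j c hkj hj hd hall
      by_cases hkj' : k = j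
      · rw [hkj']
      · have hk : k < s.length := by omega
        have hdrop : s.drop k = s.getD k 0 :: s.drop (k + 1) := by
          rw [List.getD_eq_getElem s 0 hk]
          exact (List.getElem_cons_drop hk).symm
        rw [hdrop, List.foldl_cons]
        have hle : s.getD k 0 ≤ e := hall k (le_refl _) (by omega)
        have hstep : bstep l (c, some e) (s.getD k 0) = (c, some e) := by
          simp only [bstep, if_neg (by omega : ¬ e < s.getD k 0)]
        rw [hstep]
        exact ih (k + 1) j c (by omega) hj (by omega) (fun k' h1 h2 => hall k' (by omega) h2)

-- B's outer loop equals the endpoint fold over the remaining suffix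
lemma goB_eq_fold (l : Int) (s : List Int)
    (hmono : ∀ k m : Nat, k ≤ m → m < s.length → s.getD k 0 ≤ s.getD m 0) :
    ∀ (fuel i : Nat) (c : Int), s.length - i ≤ fuel →
      ((s.drop i).foldl (bstep l) (c, none)).1 = goB l s fuel c i := by
  intro fuel
  induction fuel with
  | zero =>
      intro i c hd
      simp only [goB]
      rw [List.drop_eq_nil_of_le (by omega : s.length ≤ i)]
      rfl
  | succ d ih =>
      intro i c hd
      simp only [goB]
      by_cases hi : i < s.length
      · rw [if_pos hi]
        simp only [PySem.List.pyGetD_natCast]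
        set e := s.getD i 0 + l - 1 with he
        set j := bsearch s e (s.length - (i + 1)) (i + 1) s.length with hjdef
        obtain ⟨h1, h2, h3, h4⟩ :=
          bsearch_spec s e hmono (s.length - (i + 1)) (i + 1) s.length (by omega) (by omega)
            (le_refl _)
        have hdrop : s.drop i = s.getD i 0 :: s.drop (i + 1) := by
          rw [List.getD_eq_getElem s 0 hi]
          exact (List.getElem_cons_drop hi).symm
        rw [hdrop, List.foldl_cons]
        have hstep : bstep l (c, none) (s.getD i 0) = (c + 1, some e) := rfl
        rw [hstep]
        rw [fold_skip l s e s.length (i + 1) j (c + 1) h1 h2 (by omega) h3]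
        by_cases hj : j < s.length
        · have hdropj : s.drop j = s.getD j 0 :: s.drop (j + 1) := by
            rw [List.getD_eq_getElem s 0 hj]
            exact (List.getElem_cons_drop hj).symm
          have hIH := ih j (c + 1) (by omega)
          rw [hdropj, List.foldl_cons] at hIH ⊢
          have hs1 : bstep l (c + 1, some e) (s.getD j 0) = (c + 1 + 1, some (s.getD j 0 + l - 1)) := by
            simp only [bstep]
            rw [if_pos (h4 hj)]
          have hs2 : bstep l (c + 1, none) (s.getD j 0) = (c + 1 + 1, some (s.getD j 0 + l - 1)) := rfl
          rw [hs1]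
          rw [hs2] at hIH
          exact hIH
        · have hjn : j = s.length := by omega
          rw [hjn, List.drop_length]
          have hgo : goB l s d (c + 1) s.length = c + 1 := by
            cases d with
            | zero => rfl
            | succ d' => simp only [goB]; rw [if_neg (by omega : ¬ s.length < s.length)]
          rw [hgo]
          rfl
      · rw [if_neg hi]
        rw [List.drop_eq_nil_of_le (by omega : s.length ≤ i)]
        rfl

lemma sorted_mono (pipes : List Int) :
    ∀ k m : Nat, k ≤ m → m < (PySem.List.sorted pipes (fun x => x) false).length →
      (PySem.List.sorted pipes (fun x => x) false).getD k 0 ≤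
        (PySem.List.sorted pipes (fun x => x) false).getD m 0 := by
  intro k m hkm hm
  have hpw := PySem.List.sorted_pairwise pipes (fun x => x)
  rcases eq_or_lt_of_le hkm with rfl | hlt
  · exact le_refl _
  · rw [List.getD_eq_getElem _ 0 (by omega), List.getD_eq_getElem _ 0 hm]
    exact List.pairwise_iff_getElem.mp hpw k m (by omega) hm hlt

lemma solution_alt_eq (l : Int) (pipes : List Int) :
    solution_alt l pipes =
      ((PySem.List.sorted pipes (fun x => x) false).foldl (bstep l) (0, none)).1 := by
  unfold solution_alt
  rw [← goB_eq_fold l (PySem.List.sorted pipes (fun x => x) false) (sorted_mono pipes)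
    (PySem.List.sorted pipes (fun x => x) false).length 0 0 (by omega)]
  rfl

-- ---- bridge from A's port to the bstep fold ----

lemma loopA_eq (l : Int) (s : List Int) :
    ∀ (m k : Nat) (st : Int × Int), k < s.length → s.length - 1 - k = m →
      (PySem.List.pyRange (k : Int) ((s.length : Int) - 1) 1).foldl (astep l s) st =
        goA l st (s.getD k 0) (s.drop (k + 1)) := by
  intro m
  induction m with
  | zero =>
      intro k st hk hm
      have hk' : k = s.length - 1 := by omega
      rw [PySem.List.pyRange_one_eq_nil (by omega : ((s.length : Int) - 1) ≤ (k : Int))]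
      rw [List.drop_eq_nil_of_le (by omega : s.length ≤ k + 1)]
      rfl
  | succ m ih =>
      intro k st hk hm
      have hlt : (k : Int) < (s.length : Int) - 1 := by omega
      rw [PySem.List.pyRange_one_cons hlt, List.foldl_cons]
      have hk1 : k + 1 < s.length := by omega
      have ih' := ih (k + 1) (astep l s st (k : Int)) hk1 (by omega)
      have hcast : ((k : Int) + 1) = ((k + 1 : Nat) : Int) := by push_cast; ring
      rw [hcast, ih']
      have hdrop : s.drop (k + 1) = s.getD (k + 1) 0 :: s.drop (k + 2) := by
        rw [List.getD_eq_getElem s 0 hk1]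
        exact (List.getElem_cons_drop hk1).symm
      rw [hdrop]
      conv_rhs => rw [goA]
      congr 1
      simp only [astep, hcast, PySem.List.pyGetD_natCast]

-- A's accumulator state equals the fold's endpoint state: total = prev - start, end = start + l - 1.
lemma lemAB (l : Int) :
    ∀ (xs : List Int) (start ans prev : Int),
      (goA l (ans, prev - start) prev xs).1 + 1 =
        (xs.foldl (bstep l) (ans + 1, some (start + l - 1))).1 := by
  intro xs
  induction xs with
  | nil => intro start ans prev; simp [goA]
  | cons p rest ih =>
      intro start ans prev
      rw [goA, List.foldl_cons]
      by_cases hc : start + l - 1 < p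
      · have hc' : ¬ (prev - start + (p - prev) ≤ l - 1) := by omega
        rw [if_neg hc']
        have h0 : (ans + 1, (0 : Int)) = (ans + 1, p - p) := by ring_nf
        rw [h0]
        rw [ih p (ans + 1) p]
        simp only [bstep, if_pos hc]
      · have hc' : prev - start + (p - prev) ≤ l - 1 := by omega
        rw [if_pos hc']
        have h1 : (ans, prev - start + (p - prev)) = (ans, p - start) := by ring_nf
        rw [h1, ih start ans p]
        simp only [bstep, if_neg hc]

-- With l = 1 on a strictly increasing suffix, the fold counts every element.
lemma bstep_one_all (xs : List Int) :
    ∀ (c e : Int), xs.Pairwise (· < ·) → (∀ p ∈ xs, e < p) →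
      (xs.foldl (bstep 1) (c, some e)).1 = c + xs.length := by
  induction xs with
  | nil => intro c e _ _; simp
  | cons p rest ih =>
      intro c e hpw hall
      rw [List.foldl_cons]
      have hep : e < p := hall p (List.mem_cons_self ..)
      rw [List.pairwise_cons] at hpw
      simp only [bstep, if_pos hep]
      rw [ih (c + 1) (p + 1 - 1) hpw.2 (fun q hq => by have := hpw.1 q hq; omega)]
      push_cast [List.length_cons]; ring

-- The fold never counts more elements than the list has.
lemma bstep_one_le (xs : List Int) :
    ∀ (c e : Int), (xs.foldl (bstep 1) (c, some e)).1 ≤ c + xs.length := by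
  induction xs with
  | nil => intro c e; simp
  | cons p rest ih =>
      intro c e
      rw [List.foldl_cons]
      by_cases hep : e < p
      · simp only [bstep, if_pos hep]
        have := ih (c + 1) (p + 1 - 1); push_cast [List.length_cons] at *; omega
      · simp only [bstep, if_neg hep]
        have := ih c e; push_cast [List.length_cons] at *; omega

-- If some element already lies under the current endpoint, the fold skips at least once.
lemma bstep_one_skip (xs : List Int) :
    ∀ (c e x : Int), x ∈ xs → x ≤ e → (xs.foldl (bstep 1) (c, some e)).1 < c + xs.length := by
  induction xs with
  | nil => intro c e x hx; exact absurd hx (List.not_mem_nil)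
  | cons p rest ih =>
      intro c e x hx hxe
      rw [List.foldl_cons]
      rcases List.mem_cons.mp hx with rfl | hxr
      · have hep : ¬ e < x := by omega
        simp only [bstep, if_neg hep]
        have := bstep_one_le rest c e; push_cast [List.length_cons] at *; omega
      · by_cases hep : e < p
        · simp only [bstep, if_pos hep]
          have := ih (c + 1) (p + 1 - 1) x hxr (by omega)
          push_cast [List.length_cons] at *; omega
        · simp only [bstep, if_neg hep]
          have := ih c e x hxr hxe; push_cast [List.length_cons] at *; omega

-- On a list with a repeated element, the fold counts strictly fewer than the length (l = 1).
lemma bstep_one_dup (xs : List Int) :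
    ∀ (c e : Int), ¬ xs.Nodup → (xs.foldl (bstep 1) (c, some e)).1 < c + xs.length := by
  induction xs with
  | nil => intro c e h; exact absurd List.nodup_nil h
  | cons p rest ih =>
      intro c e h
      rw [List.foldl_cons]
      have hcases : p ∈ rest ∨ ¬ rest.Nodup := by
        by_contra hcon; push_neg at hcon
        exact h (List.nodup_cons.mpr ⟨hcon.1, hcon.2⟩)
      by_cases hep : e < p
      · simp only [bstep, if_pos hep]
        rcases hcases with hpr | hnd
        · have := bstep_one_skip rest (c + 1) (p + 1 - 1) p hpr (by omega)
          push_cast [List.length_cons] at *; omega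
        · have := ih (c + 1) (p + 1 - 1) hnd; push_cast [List.length_cons] at *; omega
      · simp only [bstep, if_neg hep]
        have := bstep_one_le rest c e; push_cast [List.length_cons] at *; omega

lemma sorted_strict (pipes : List Int) (hnd : pipes.Nodup) :
    (PySem.List.sorted pipes (fun x => x) false).Pairwise (· < ·) := by
  have hle := PySem.List.sorted_pairwise pipes (fun x => x)
  have hnds : (PySem.List.sorted pipes (fun x => x) false).Nodup :=
    (PySem.List.sorted_perm pipes (fun x => x) false).symm.nodup hnd
  exact (hle.and hnds).imp (fun h => lt_of_le_of_ne h.1 h.2)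

-- l = 1 with no duplicates: both sides equal the length.
lemma eq_of_one (pipes : List Int) (hnd : pipes.Nodup) :
    solution 1 pipes = solution_alt 1 pipes := by
  rw [solution_alt_eq]
  have hA : solution 1 pipes = (pipes.length : Int) := by simp [solution]
  rw [hA]
  rcases hs : PySem.List.sorted pipes (fun x => x) false with _ | ⟨x, xs⟩
  · have : pipes = [] := (PySem.List.sorted_eq_nil_iff pipes (fun x => x) false).mp hs
    simp [this]
  · have hpw : (x :: xs).Pairwise (· < ·) := hs ▸ sorted_strict pipes hnd
    rw [List.pairwise_cons] at hpw
    rw [List.foldl_cons]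
    show _ = (xs.foldl (bstep 1) (0 + 1, some (x + 1 - 1))).1
    rw [bstep_one_all xs (0 + 1) (x + 1 - 1) hpw.2 (fun q hq => by have := hpw.1 q hq; omega)]
    have hlen : pipes.length = (x :: xs).length :=
      ((PySem.List.sorted_perm pipes (fun x => x) false).symm.length_eq).trans (by rw [hs])
    rw [hlen]; push_cast [List.length_cons]; ring

-- l ≠ 1 with a nonempty list: the gap accumulator and the binary-search greedy agree.
lemma eq_of_ne_one (l : Int) (pipes : List Int) (hl : l ≠ 1) (hne : pipes ≠ []) :
    solution l pipes = solution_alt l pipes := by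
  rw [solution_eq l pipes hl, solution_alt_eq]
  rcases hs : PySem.List.sorted pipes (fun x => x) false with _ | ⟨x, xs⟩
  · exact absurd ((PySem.List.sorted_eq_nil_iff pipes (fun x => x) false).mp hs) hne
  · have h0 : 0 < (x :: xs).length := by simp
    have hl0 := loopA_eq l (x :: xs) ((x :: xs).length - 1 - 0) 0 (0, 0) h0 rfl
    norm_num at hl0
    have hlen2 : (((x :: xs).length : Int) - 1) = (xs.length : Int) := by
      push_cast [List.length_cons]; ring
    rw [hlen2, hl0]
    show (goA l (0, 0) x xs).1 + 1 = ((x :: xs).foldl (bstep l) (0, none)).1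
    rw [List.foldl_cons]
    show _ = (xs.foldl (bstep l) (0 + 1, some (x + l - 1))).1
    have h00 : ((0 : Int), (0 : Int)) = ((0 : Int), x - x) := by ring_nf
    rw [h00]
    exact lemAB l xs x 0 x

-- ===== VERDICT (by name: the statement is the Claim_ definition above) =====
theorem solution_spec : Claim_unchanged_solution := by
  intro l pipes _ hnd
  unfold D_solution at hnd
  push_neg at hnd
  by_cases hl : l = 1
  · subst hl
    exact eq_of_one pipes (hnd.2 rfl)
  · exact eq_of_ne_one l pipes hl (hnd.1 hl)

theorem solution_changed : Claim_changed_solution := by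
  unfold Claim_changed_solution; decide

theorem solution_tight : Claim_exact_solution := by
  intro l pipes _ hD
  rcases hD with ⟨hl, rfl⟩ | ⟨rfl, hnd⟩
  · have hA : solution l [] = 1 := by
      rw [solution_eq l [] hl]
      norm_num [PySem.List.sorted, PySem.List.pyRange_one_eq_nil]
    have hB : solution_alt l [] = 0 := by
      rw [solution_alt_eq]; simp [PySem.List.sorted]
    rw [hA, hB]; omega
  · have hA : solution 1 pipes = (pipes.length : Int) := by simp [solution]
    rw [hA, solution_alt_eq]
    rcases hs : PySem.List.sorted pipes (fun x => x) false with _ | ⟨x, xs⟩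
    · exact absurd ((PySem.List.sorted_eq_nil_iff pipes (fun x => x) false).mp hs)
        (fun h => hnd (h ▸ List.nodup_nil))
    · have hnds : ¬ (x :: xs).Nodup := fun h =>
        hnd ((PySem.List.sorted_perm pipes (fun x => x) false).nodup (hs ▸ h))
      rw [List.foldl_cons]
      show _ ≠ (xs.foldl (bstep 1) (0 + 1, some (x + 1 - 1))).1
      have hlen : pipes.length = xs.length + 1 :=
        ((PySem.List.sorted_perm pipes (fun x => x) false).symm.length_eq).trans (by rw [hs]; rfl)
      have hlt : (xs.foldl (bstep 1) (0 + 1, some (x + 1 - 1))).1 < 0 + 1 + xs.length := by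
        rcases (by
          by_contra hcon; push_neg at hcon
          exact hnds (List.nodup_cons.mpr ⟨hcon.1, hcon.2⟩) :
          x ∈ xs ∨ ¬ xs.Nodup) with hpr | hx
        · exact bstep_one_skip xs (0 + 1) (x + 1 - 1) x hpr (by omega)
        · exact bstep_one_dup xs (0 + 1) (x + 1 - 1) hx
      rw [hlen]; push_cast [List.length_cons] at *; omega
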